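-- pv_equiv track=rewrite | github.com/thehalleyyoung/deppy | src/deppy/render/predicate_refine.py | bipartite_matching_correct
-- ===== SOURCE A (Python) =====
-- from typing import (
--     Any,
--     Callable,
--     Dict,
--     FrozenSet,
--     Iterator,
--     List,
--     Optional,
--     Sequence,
--     Set,
--     Tuple,
--     Union,
-- )
--
-- def bipartite_matching_correct(adj: Dict[int, List[int]],
--                                matching: Dict[int, int]) -> bool:
--     """Check maximum bipartite matching size against Hopcroft-Karp ground truth."""
--     # Check matching validity: each node matched at most once
--     right_matched = set()
--     for u, v in matching.items():
--         if v in adj.get(u, []):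
--             if v in right_matched:
--                 return False
--             right_matched.add(v)
--         else:
--             return False
--     # Check maximality via augmenting path search
--     match_u = dict(matching)
--     match_v = {v: u for u, v in matching.items()}
--
--     def dfs_augment(u, visited):
--         for v in adj.get(u, []):
--             if v not in visited:
--                 visited.add(v)
--                 if v not in match_v or dfs_augment(match_v[v], visited):
--                     return True
--         return False
--
--     # If we can find an augmenting path, matching isn't maximum
--     for u in adj:
--         if u not in match_u:
--             if dfs_augment(u, set()):
--                 return False
--     return True
-- ===== SOURCE B (Python) =====
-- def bipartite_matching_correct(adj, matching):
--     """Validity + maximality via an iterative alternating-path (stack) search."""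
--     if any(v not in adj.get(u, []) for u, v in matching.items()):
--         return False
--     vals = list(matching.values())
--     if len(set(vals)) != len(vals):
--         return False
--     match_v = {v: u for u, v in matching.items()}
--     for u in adj:
--         if u in matching:
--             continue
--         visited = set()
--         stack = [u]
--         while stack:
--             x = stack.pop()
--             for v in adj.get(x, []):
--                 if v not in visited:
--                     if v not in match_v:
--                         return False
--                     visited.add(v)
--                     stack.append(match_v[v])
--     return True
-- ===== Notes on version B (the rewrite author's own statement) =====
-- stated objective: alternative
-- what changed: The recursive dfs_augment is replaced by an iterative alternating-path reachability search with an explicit stack of left vertices and a fresh visited set per unmatched start, and the early-return validity loop is replaced by an all-membership test plus a duplicate count over the matched right endpoints.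
import Mathlib
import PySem

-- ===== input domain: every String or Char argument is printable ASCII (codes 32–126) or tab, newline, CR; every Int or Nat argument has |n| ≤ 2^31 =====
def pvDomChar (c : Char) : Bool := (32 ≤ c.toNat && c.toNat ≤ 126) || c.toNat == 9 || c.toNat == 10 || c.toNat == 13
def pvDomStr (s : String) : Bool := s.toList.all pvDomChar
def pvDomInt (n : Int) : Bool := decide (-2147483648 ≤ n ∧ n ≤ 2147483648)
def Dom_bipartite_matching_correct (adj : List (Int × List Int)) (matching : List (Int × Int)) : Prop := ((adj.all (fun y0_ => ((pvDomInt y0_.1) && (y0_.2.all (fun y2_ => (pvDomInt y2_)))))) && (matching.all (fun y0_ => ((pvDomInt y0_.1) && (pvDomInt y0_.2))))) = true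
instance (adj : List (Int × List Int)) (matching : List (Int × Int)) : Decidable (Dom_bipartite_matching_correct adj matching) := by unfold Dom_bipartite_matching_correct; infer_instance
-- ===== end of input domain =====

-- B replaces A's recursive dfs_augment by an iterative stack-based alternating-path search and
-- replaces the early-return validity loop by an all-membership test plus a distinctness count
-- (objective: alternative decomposition, same asymptotic cost).

-- shared helper: Python dict lookup adj.get(u, []) — exact for a dict (unique keys): first match
def pvAdjGet (adj : List (Int × List Int)) (u : Int) : List Int :=
  match adj with
  | [] => []
  | p :: rest => if p.1 == u then p.2 else pvAdjGet rest u

-- shared helper: both Pythons build match_v = {v: u for u, v in matching.items()} the same way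
def pvMatchV (matching : List (Int × Int)) : PySem.Dict Int Int :=
  matching.foldl (fun d p => d.insert p.2 p.1) PySem.Dict.empty

-- ===== PORT A =====
-- validity loop with early return and a growing right_matched set
def pvA_valid (adj : List (Int × List Int)) : List (Int × Int) → PySem.Set Int → Bool
  | [], _ => true
  | p :: rest, rm =>
    if p.2 ∈ pvAdjGet adj p.1 then
      if p.2 ∈ rm then false
      else pvA_valid adj rest (PySem.Set.add rm p.2)
    else false

-- the `for v in adj.get(u, [])` body of dfs_augment; `rec` is the recursive dfs call
def pvA_loop (adj : List (Int × List Int)) (mv : PySem.Dict Int Int)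
    (rec : Int → List Int → Bool × List Int) : List Int → List Int → Bool × List Int
  | [], vis => (false, vis)
  | v :: vs, vis =>
    if v ∈ vis then pvA_loop adj mv rec vs vis
    else
      match mv.get? v with
      | none => (true, PySem.Set.add vis v)
      | some u' =>
        let r := rec u' (PySem.Set.add vis v)
        if r.1 then r else pvA_loop adj mv rec vs r.2

-- dfs_augment; the Nat is a recursion-depth bound, |all right endpoints| + 1 is provably enough
def pvA_dfs (adj : List (Int × List Int)) (mv : PySem.Dict Int Int) :
    Nat → Int → List Int → Bool × List Int
  | 0, _, vis => (false, vis)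
  | f + 1, u, vis => pvA_loop adj mv (pvA_dfs adj mv f) (pvAdjGet adj u) vis

-- `for u in adj: if u not in match_u: if dfs_augment(u, set()): return False`
def pvA_outer (adj : List (Int × List Int)) (mv : PySem.Dict Int Int)
    (mu : PySem.Dict Int Int) : List (Int × List Int) → Bool
  | [] => true
  | p :: rest =>
    if mu.contains p.1 then pvA_outer adj mv mu rest
    else if (pvA_dfs adj mv ((adj.map (·.2)).flatten.length + 1) p.1 PySem.Set.empty).1 then false
    else pvA_outer adj mv mu rest

def bipartite_matching_correct (adj : List (Int × List Int)) (matching : List (Int × Int)) : Bool :=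
  if pvA_valid adj matching PySem.Set.empty then
    pvA_outer adj (pvMatchV matching) (PySem.Dict.mk matching) adj
  else false

-- ===== PORT B =====
-- the inner `for v in adj.get(x, [])` of the while loop: none = unmatched right found
def pvB_scan (adj : List (Int × List Int)) (mv : PySem.Dict Int Int) :
    List Int → List Int → List Int → Option (List Int × List Int)
  | [], stack, vis => some (stack, vis)
  | v :: vs, stack, vis =>
    if v ∈ vis then pvB_scan adj mv vs stack vis
    else
      match mv.get? v with
      | none => none
      | some u' => pvB_scan adj mv vs (u' :: stack) (PySem.Set.add vis v)

-- `while stack:` — head of the list is the top of Python's stack; the Nat bounds the number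
-- of iterations, |all right endpoints| + 2 is provably enough
def pvB_search (adj : List (Int × List Int)) (mv : PySem.Dict Int Int) :
    Nat → List Int → List Int → Bool
  | 0, _, _ => false
  | _ + 1, [], _ => false
  | f + 1, x :: stack, vis =>
    match pvB_scan adj mv (pvAdjGet adj x) stack vis with
    | none => true
    | some sv => pvB_search adj mv f sv.1 sv.2

def pvB_outer (adj : List (Int × List Int)) (mv : PySem.Dict Int Int)
    (matching : List (Int × Int)) : List (Int × List Int) → Bool
  | [] => true
  | p :: rest =>
    if matching.any (fun q => q.1 == p.1) then pvB_outer adj mv matching rest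
    else if pvB_search adj mv ((adj.map (·.2)).flatten.length + 2) [p.1] PySem.Set.empty then false
    else pvB_outer adj mv matching rest

def bipartite_matching_correct_alt (adj : List (Int × List Int)) (matching : List (Int × Int)) : Bool :=
  if matching.any (fun p => decide (p.2 ∉ pvAdjGet adj p.1)) then false
  else if PySem.Set.len (PySem.Set.ofList (matching.map (·.2))) != (matching.map (·.2)).length then false
  else pvB_outer adj (pvMatchV matching) matching adj

-- ===== PRECONDITION & SPEC =====
def Spec_bipartite_matching_correct (adj : List (Int × List Int)) (matching : List (Int × Int)) (out : Bool) : Prop := out = bipartite_matching_correct_alt adj matching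
instance (adj : List (Int × List Int)) (matching : List (Int × Int)) (out : Bool) : Decidable (Spec_bipartite_matching_correct adj matching out) := by unfold Spec_bipartite_matching_correct; infer_instance

-- ===== CLAIM (what is proved, stated in full; the proofs are below) =====
def Claim_equal_bipartite_matching_correct : Prop := ∀ (adj : List (Int × List Int)) (matching : List (Int × Int)), Dom_bipartite_matching_correct adj matching → Spec_bipartite_matching_correct adj matching (bipartite_matching_correct adj matching)

-- ===== LEMMAS AND PROOFS =====

-- all right endpoints of the graph
def pvU (adj : List (Int × List Int)) : List Int := (adj.map (·.2)).flatten

-- one alternating step: from right a through its matched left to a neighbouring right b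
def pvRel (adj : List (Int × List Int)) (mv : PySem.Dict Int Int) (a b : Int) : Prop :=
  ∃ u', mv.get? a = some u' ∧ b ∈ pvAdjGet adj u'

-- an augmenting path from left u exists
def pvEx (adj : List (Int × List Int)) (mv : PySem.Dict Int Int) (u : Int) : Prop :=
  ∃ w, (∃ v ∈ pvAdjGet adj u, Relation.ReflTransGen (pvRel adj mv) v w) ∧ mv.get? w = none

-- number of right endpoints not yet visited
def pvCnt (adj : List (Int × List Int)) (vis : List Int) : Nat :=
  ((pvU adj).toFinset \ vis.toFinset).card

-- the new elements of vis' are matched and their alternating successors stay in vis'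
def pvClo (adj : List (Int × List Int)) (mv : PySem.Dict Int Int) (vis vis' : List Int) : Prop :=
  ∀ v ∈ vis', v ∉ vis → ∃ u', mv.get? v = some u' ∧ pvAdjGet adj u' ⊆ vis'

lemma pvAdjGet_subset_U (adj : List (Int × List Int)) (u : Int) :
    pvAdjGet adj u ⊆ pvU adj := by
  induction adj with
  | nil => simp [pvAdjGet]
  | cons p rest ih =>
    intro v hv
    rw [pvAdjGet] at hv
    have hU : pvU (p :: rest) = p.2 ++ pvU rest := by simp [pvU]
    rw [hU, List.mem_append]
    by_cases h : p.1 == u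
    · simp only [h, if_true] at hv; exact Or.inl hv
    · simp only [h] at hv
      simp at hv ⊢
      exact Or.inr (ih hv)

lemma pvCnt_le (adj : List (Int × List Int)) (vis : List Int) :
    pvCnt adj vis ≤ (pvU adj).length := by
  exact le_trans (Finset.card_le_card Finset.sdiff_subset) (List.toFinset_card_le _)

lemma pvCnt_anti (adj : List (Int × List Int)) {vis vis' : List Int} (h : vis ⊆ vis') :
    pvCnt adj vis' ≤ pvCnt adj vis := by
  apply Finset.card_le_card
  intro x hx
  rw [Finset.mem_sdiff] at hx ⊢
  refine ⟨hx.1, fun hm => hx.2 ?_⟩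
  rw [List.mem_toFinset] at hm ⊢
  exact h hm

lemma pvCnt_add (adj : List (Int × List Int)) {vis : List Int} {v : Int}
    (hU : v ∈ pvU adj) (hv : v ∉ vis) :
    pvCnt adj (PySem.Set.add vis v) + 1 = pvCnt adj vis := by
  have hm : v ∈ (pvU adj).toFinset \ vis.toFinset := by
    rw [Finset.mem_sdiff, List.mem_toFinset, List.mem_toFinset]; exact ⟨hU, hv⟩
  have h1 : pvCnt adj (PySem.Set.add vis v) = pvCnt adj vis - 1 := by
    unfold pvCnt
    rw [PySem.Set.add_of_not_mem hv, List.toFinset_append]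
    have : ([v] : List Int).toFinset = {v} := by simp
    rw [this, Finset.union_singleton, Finset.sdiff_insert, Finset.card_erase_of_mem hm]
  have h2 : 1 ≤ pvCnt adj vis := Finset.card_pos.mpr ⟨v, hm⟩
  omega

-- a closed, matched set of rights admits no augmenting suffix
lemma pv_reach_closed (adj : List (Int × List Int)) (mv : PySem.Dict Int Int)
    (S : List Int) (hclo : ∀ v ∈ S, ∃ u', mv.get? v = some u' ∧ pvAdjGet adj u' ⊆ S)
    {v w : Int} (hr : Relation.ReflTransGen (pvRel adj mv) v w) (hv : v ∈ S) :
    w ∈ S ∧ ∃ u', mv.get? w = some u' := by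
  induction hr with
  | refl => exact ⟨hv, (hclo v hv).elim (fun u' h => ⟨u', h.1⟩)⟩
  | tail hr' step ih =>
    obtain ⟨hxS, -⟩ := ih
    obtain ⟨u', hg, hsub⟩ := hclo _ hxS
    obtain ⟨u'', hg', hw⟩ := step
    rw [hg] at hg'
    obtain rfl : u' = u'' := by injection hg'
    have hwS := hsub hw
    exact ⟨hwS, (hclo _ hwS).elim (fun u0 h => ⟨u0, h.1⟩)⟩

-- ===== A-side search lemmas =====
lemma pvA_loop_sound (adj : List (Int × List Int)) (mv : PySem.Dict Int Int)
    (rec : Int → List Int → Bool × List Int)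
    (Hrec : ∀ u vis, (rec u vis).1 = true → pvEx adj mv u) :
    ∀ vs vis, (pvA_loop adj mv rec vs vis).1 = true →
      ∃ w, (∃ v ∈ vs, Relation.ReflTransGen (pvRel adj mv) v w) ∧ mv.get? w = none := by
  intro vs
  induction vs with
  | nil => intro vis h; simp [pvA_loop] at h
  | cons v vs ih =>
    intro vis h
    rw [pvA_loop] at h
    by_cases hv : v ∈ vis
    · rw [if_pos hv] at h
      obtain ⟨w, ⟨v0, hv0, hr⟩, hw⟩ := ih vis h
      exact ⟨w, ⟨v0, List.mem_cons_of_mem _ hv0, hr⟩, hw⟩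
    · rw [if_neg hv] at h
      cases hg : mv.get? v with
      | none => exact ⟨v, ⟨v, List.mem_cons_self .., Relation.ReflTransGen.refl⟩, hg⟩
      | some u' =>
        simp only [hg] at h
        by_cases hr1 : (rec u' (PySem.Set.add vis v)).1 = true
        · obtain ⟨w, ⟨v0, hv0, hr⟩, hw⟩ := Hrec u' _ hr1
          exact ⟨w, ⟨v, List.mem_cons_self ..,
            Relation.ReflTransGen.head ⟨u', hg, hv0⟩ hr⟩, hw⟩
        · simp only [Bool.not_eq_true] at hr1
          rw [if_neg (by simp [hr1])] at h
          obtain ⟨w, ⟨v0, hv0, hr⟩, hw⟩ := ih _ h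
          exact ⟨w, ⟨v0, List.mem_cons_of_mem _ hv0, hr⟩, hw⟩

lemma pvA_dfs_sound (adj : List (Int × List Int)) (mv : PySem.Dict Int Int) :
    ∀ f u vis, (pvA_dfs adj mv f u vis).1 = true → pvEx adj mv u := by
  intro f
  induction f with
  | zero => intro u vis h; simp [pvA_dfs] at h
  | succ f ih =>
    intro u vis h
    rw [pvA_dfs] at h
    exact pvA_loop_sound adj mv _ (fun u0 vis0 h0 => ih u0 vis0 h0) _ _ h

lemma pvA_loop_closed (adj : List (Int × List Int)) (mv : PySem.Dict Int Int)
    (rec : Int → List Int → Bool × List Int) (n : Nat)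
    (Hrec : ∀ u vis vis', pvCnt adj vis < n → rec u vis = (false, vis') →
      vis ⊆ vis' ∧ pvAdjGet adj u ⊆ vis' ∧ pvClo adj mv vis vis') :
    ∀ vs vis vis', vs ⊆ pvU adj → pvCnt adj vis ≤ n →
      pvA_loop adj mv rec vs vis = (false, vis') →
      vis ⊆ vis' ∧ vs ⊆ vis' ∧ pvClo adj mv vis vis' := by
  intro vs
  induction vs with
  | nil =>
    intro vis vis' _ _ h
    rw [pvA_loop] at h
    injection h with h1 h2
    subst h2
    exact ⟨List.Subset.refl _, by simp, fun v hv hnv => absurd hv hnv⟩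
  | cons v vs ih =>
    intro vis vis' hvs hn h
    have hvU : v ∈ pvU adj := hvs (List.mem_cons_self ..)
    have hvsU : vs ⊆ pvU adj := fun x hx => hvs (List.mem_cons_of_mem _ hx)
    rw [pvA_loop] at h
    by_cases hv : v ∈ vis
    · rw [if_pos hv] at h
      obtain ⟨h1, h2, h3⟩ := ih vis vis' hvsU hn h
      exact ⟨h1, List.cons_subset.mpr ⟨h1 hv, h2⟩, h3⟩
    · rw [if_neg hv] at h
      cases hg : mv.get? v with
      | none => simp [hg] at h
      | some u' =>
        simp only [hg] at h
        have hcnt := pvCnt_add adj hvU hv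
        by_cases hr1 : (rec u' (PySem.Set.add vis v)).1 = true
        · rw [if_pos hr1] at h
          rw [h] at hr1; simp at hr1
        · simp only [Bool.not_eq_true] at hr1
          rw [if_neg (by simp [hr1])] at h
          rcases hrec : rec u' (PySem.Set.add vis v) with ⟨b, vis2⟩
          rw [hrec] at hr1 h
          simp at hr1; subst hr1
          obtain ⟨k1, k2, k3⟩ := Hrec u' (PySem.Set.add vis v) vis2 (by omega) hrec
          have hsub1 : vis ⊆ PySem.Set.add vis v := by
            intro x hx; rw [PySem.Set.mem_add]; exact Or.inl hx
          have hvmem : v ∈ PySem.Set.add vis v := by rw [PySem.Set.mem_add]; exact Or.inr rfl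
          have hcnt2 : pvCnt adj vis2 ≤ n := by
            have := pvCnt_anti adj k1; omega
          obtain ⟨g1, g2, g3⟩ := ih vis2 vis' hvsU hcnt2 h
          refine ⟨(hsub1.trans k1).trans g1, List.cons_subset.mpr ⟨g1 (k1 hvmem), g2⟩, ?_⟩
          intro v0 hv0 hnv0
          by_cases hin2 : v0 ∈ vis2
          · by_cases hinadd : v0 ∈ PySem.Set.add vis v
            · have : v0 = v := by
                rw [PySem.Set.mem_add] at hinadd
                rcases hinadd with h' | h'
                · exact absurd h' hnv0
                · exact h'
              subst this
              exact ⟨u', hg, k2.trans g1⟩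
            · obtain ⟨u0, hu0, hs0⟩ := k3 v0 hin2 hinadd
              exact ⟨u0, hu0, hs0.trans g1⟩
          · exact g3 v0 hv0 hin2

lemma pvA_dfs_closed (adj : List (Int × List Int)) (mv : PySem.Dict Int Int) :
    ∀ f u vis vis', pvCnt adj vis < f → pvA_dfs adj mv f u vis = (false, vis') →
      vis ⊆ vis' ∧ pvAdjGet adj u ⊆ vis' ∧ pvClo adj mv vis vis' := by
  intro f
  induction f with
  | zero => intro u vis vis' hn; omega
  | succ f ih =>
    intro u vis vis' hn h
    rw [pvA_dfs] at h
    obtain ⟨h1, h2, h3⟩ := pvA_loop_closed adj mv _ f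
      (fun u0 vis0 vis0' hc he => ih u0 vis0 vis0' hc he) _ _ _
      (pvAdjGet_subset_U adj u) (by omega) h
    exact ⟨h1, h2, h3⟩

-- ===== B-side search lemmas =====
lemma pvB_scan_none (adj : List (Int × List Int)) (mv : PySem.Dict Int Int) :
    ∀ vs stack vis, pvB_scan adj mv vs stack vis = none →
      ∃ v ∈ vs, mv.get? v = none := by
  intro vs
  induction vs with
  | nil => intro stack vis h; simp [pvB_scan] at h
  | cons v vs ih =>
    intro stack vis h
    rw [pvB_scan] at h
    by_cases hv : v ∈ vis
    · rw [if_pos hv] at h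
      obtain ⟨v0, h0, hg⟩ := ih _ _ h
      exact ⟨v0, List.mem_cons_of_mem _ h0, hg⟩
    · rw [if_neg hv] at h
      cases hg : mv.get? v with
      | none => exact ⟨v, List.mem_cons_self .., hg⟩
      | some u' =>
        simp only [hg] at h
        obtain ⟨v0, h0, hg0⟩ := ih _ _ h
        exact ⟨v0, List.mem_cons_of_mem _ h0, hg0⟩

lemma pvB_scan_some (adj : List (Int × List Int)) (mv : PySem.Dict Int Int) :
    ∀ vs stack vis st' vis', pvB_scan adj mv vs stack vis = some (st', vis') →
      (vis ⊆ vis' ∧ stack ⊆ st') ∧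
      (∀ v ∈ vs, v ∈ vis') ∧
      (∀ v ∈ vis', v ∉ vis → ∃ u', mv.get? v = some u' ∧ u' ∈ st') ∧
      (∀ u' ∈ st', u' ∈ stack ∨ ∃ v ∈ vs, mv.get? v = some u') ∧
      (vs ⊆ pvU adj → st'.length + pvCnt adj vis' ≤ stack.length + pvCnt adj vis) := by
  intro vs
  induction vs with
  | nil =>
    intro stack vis st' vis' h
    rw [pvB_scan] at h
    injection h with h'
    injection h' with h1 h2
    subst h1; subst h2
    exact ⟨⟨List.Subset.refl _, List.Subset.refl _⟩, by simp,
      fun v hv hnv => absurd hv hnv, fun u' hu => Or.inl hu, fun _ => le_refl _⟩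
  | cons v vs ih =>
    intro stack vis st' vis' h
    rw [pvB_scan] at h
    by_cases hv : v ∈ vis
    · rw [if_pos hv] at h
      obtain ⟨⟨p1, p2⟩, p3, p4, p5, p6⟩ := ih _ _ _ _ h
      refine ⟨⟨p1, p2⟩, ?_, p4, ?_, ?_⟩
      · intro v0 hv0
        rcases List.mem_cons.mp hv0 with rfl | h'
        · exact p1 hv
        · exact p3 _ h'
      · intro u' hu
        rcases p5 u' hu with h' | ⟨v0, h0, hg0⟩
        · exact Or.inl h'
        · exact Or.inr ⟨v0, List.mem_cons_of_mem _ h0, hg0⟩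
      · intro hsub
        exact p6 (fun x hx => hsub (List.mem_cons_of_mem _ hx))
    · rw [if_neg hv] at h
      cases hg : mv.get? v with
      | none => simp [hg] at h
      | some u' =>
        simp only [hg] at h
        obtain ⟨⟨p1, p2⟩, p3, p4, p5, p6⟩ := ih _ _ _ _ h
        have hsub1 : vis ⊆ PySem.Set.add vis v := by
          intro x hx; rw [PySem.Set.mem_add]; exact Or.inl hx
        have hvmem : v ∈ PySem.Set.add vis v := by rw [PySem.Set.mem_add]; exact Or.inr rfl
        have hstk : stack ⊆ u' :: stack := List.subset_cons_self _ _
        refine ⟨⟨hsub1.trans p1, hstk.trans p2⟩, ?_, ?_, ?_, ?_⟩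
        · intro v0 hv0
          rcases List.mem_cons.mp hv0 with rfl | h'
          · exact p1 hvmem
          · exact p3 _ h'
        · intro v0 hv0 hnv0
          by_cases hin : v0 ∈ PySem.Set.add vis v
          · have : v0 = v := by
              rw [PySem.Set.mem_add] at hin
              rcases hin with h' | h'
              · exact absurd h' hnv0
              · exact h'
            subst this
            exact ⟨u', hg, p2 (List.mem_cons_self ..)⟩
          · obtain ⟨u0, hu0, hst0⟩ := p4 v0 hv0 hin
            exact ⟨u0, hu0, hst0⟩
        · intro u0 hu0
          rcases p5 u0 hu0 with h' | ⟨v0, h0, hg0⟩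
          · rcases List.mem_cons.mp h' with rfl | h''
            · exact Or.inr ⟨v, List.mem_cons_self .., hg⟩
            · exact Or.inl h''
          · exact Or.inr ⟨v0, List.mem_cons_of_mem _ h0, hg0⟩
        · intro hsub
          have hvU : v ∈ pvU adj := hsub (List.mem_cons_self ..)
          have hcnt := pvCnt_add adj hvU hv
          have := p6 (fun x hx => hsub (List.mem_cons_of_mem _ hx))
          simp only [List.length_cons] at this
          omega

lemma pvB_search_sound (adj : List (Int × List Int)) (mv : PySem.Dict Int Int) :
    ∀ f st vis, pvB_search adj mv f st vis = true → ∃ u ∈ st, pvEx adj mv u := by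
  intro f
  induction f with
  | zero => intro st vis h; simp [pvB_search] at h
  | succ f ih =>
    intro st vis h
    match st with
    | [] => simp [pvB_search] at h
    | x :: stack =>
      rw [pvB_search] at h
      cases hs : pvB_scan adj mv (pvAdjGet adj x) stack vis with
      | none =>
        obtain ⟨v, hv, hg⟩ := pvB_scan_none adj mv _ _ _ hs
        exact ⟨x, List.mem_cons_self .., v, ⟨v, hv, Relation.ReflTransGen.refl⟩, hg⟩
      | some sv =>
        rw [hs] at h
        obtain ⟨u0, hu0, hex⟩ := ih _ _ h
        obtain ⟨⟨-, -⟩, -, -, p5, -⟩ := pvB_scan_some adj mv _ _ _ _ _ hs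
        rcases p5 u0 hu0 with h' | ⟨v, hv, hg⟩
        · exact ⟨u0, List.mem_cons_of_mem _ h', hex⟩
        · obtain ⟨w, ⟨v0, hv0, hr⟩, hw⟩ := hex
          exact ⟨x, List.mem_cons_self .., w,
            ⟨v, hv, Relation.ReflTransGen.head ⟨u0, hg, hv0⟩ hr⟩, hw⟩

lemma pvB_search_closed (adj : List (Int × List Int)) (mv : PySem.Dict Int Int) :
    ∀ f st vis, st.length + pvCnt adj vis < f → pvB_search adj mv f st vis = false →
      ∃ S, vis ⊆ S ∧ (∀ u ∈ st, pvAdjGet adj u ⊆ S) ∧ pvClo adj mv vis S := by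
  intro f
  induction f with
  | zero => intro st vis hn; omega
  | succ f ih =>
    intro st vis hn h
    match st with
    | [] =>
      exact ⟨vis, List.Subset.refl _, by simp, fun v hv hnv => absurd hv hnv⟩
    | x :: stack =>
      rw [pvB_search] at h
      cases hs : pvB_scan adj mv (pvAdjGet adj x) stack vis with
      | none => rw [hs] at h; simp at h
      | some sv =>
        rw [hs] at h
        obtain ⟨⟨q1, q2⟩, q3, q4, -, q6⟩ := pvB_scan_some adj mv _ _ _ _ _ hs
        have hlen := q6 (pvAdjGet_subset_U adj x)
        simp only [List.length_cons] at hn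
        obtain ⟨S, r1, r2, r3⟩ := ih sv.1 sv.2 (by omega) h
        refine ⟨S, q1.trans r1, ?_, ?_⟩
        · intro u hu
          rcases List.mem_cons.mp hu with rfl | h'
          · exact fun v hv => r1 (q3 v hv)
          · exact r2 u (q2 h')
        · intro v0 hv0 hnv0
          by_cases hin : v0 ∈ sv.2
          · obtain ⟨u0, hu0, hst0⟩ := q4 v0 hin hnv0
            exact ⟨u0, hu0, r2 _ hst0⟩
          · exact r3 v0 hv0 hin

-- ===== per-start equivalence =====
lemma pvA_dfs_iff (adj : List (Int × List Int)) (mv : PySem.Dict Int Int) (u : Int) :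
    (pvA_dfs adj mv ((adj.map (·.2)).flatten.length + 1) u PySem.Set.empty).1 = true ↔
      pvEx adj mv u := by
  constructor
  · exact fun h => pvA_dfs_sound adj mv _ _ _ h
  · intro hex
    by_contra hne
    rcases hres : pvA_dfs adj mv ((adj.map (·.2)).flatten.length + 1) u PySem.Set.empty
      with ⟨b, vis'⟩
    rw [hres] at hne
    simp only [Bool.not_eq_true] at hne
    subst hne
    have hcnt : pvCnt adj PySem.Set.empty < (adj.map (·.2)).flatten.length + 1 := by
      have := pvCnt_le adj PySem.Set.empty
      unfold pvU at this
      omega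
    obtain ⟨-, h2, h3⟩ := pvA_dfs_closed adj mv _ u PySem.Set.empty vis' hcnt hres
    obtain ⟨w, ⟨v, hv, hr⟩, hw⟩ := hex
    obtain ⟨-, u'', hg⟩ := pv_reach_closed adj mv vis'
      (fun v0 hv0 => h3 v0 hv0 (by simp [PySem.Set.empty])) hr (h2 hv)
    rw [hw] at hg
    cases hg

lemma pvB_search_iff (adj : List (Int × List Int)) (mv : PySem.Dict Int Int) (u : Int) :
    pvB_search adj mv ((adj.map (·.2)).flatten.length + 2) [u] PySem.Set.empty = true ↔
      pvEx adj mv u := by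
  constructor
  · intro h
    obtain ⟨u0, hu0, hex⟩ := pvB_search_sound adj mv _ _ _ h
    rcases List.mem_singleton.mp hu0 with rfl
    exact hex
  · intro hex
    by_contra hne
    simp only [Bool.not_eq_true] at hne
    have hcnt : ([u] : List Int).length + pvCnt adj PySem.Set.empty <
        (adj.map (·.2)).flatten.length + 2 := by
      have := pvCnt_le adj PySem.Set.empty
      unfold pvU at this
      simp only [List.length_singleton]
      omega
    obtain ⟨S, -, h2, h3⟩ := pvB_search_closed adj mv _ _ _ hcnt hne
    obtain ⟨w, ⟨v, hv, hr⟩, hw⟩ := hex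
    obtain ⟨-, u'', hg⟩ := pv_reach_closed adj mv S
      (fun v0 hv0 => h3 v0 hv0 (by simp [PySem.Set.empty])) hr
      (h2 u (List.mem_singleton.mpr rfl) hv)
    rw [hw] at hg
    cases hg

lemma pv_outer_eq (adj : List (Int × List Int)) (mv : PySem.Dict Int Int)
    (matching : List (Int × Int)) :
    ∀ l, pvA_outer adj mv (PySem.Dict.mk matching) l = pvB_outer adj mv matching l := by
  intro l
  induction l with
  | nil => rfl
  | cons p rest ih =>
    rw [pvA_outer, pvB_outer]
    have hc : (PySem.Dict.mk matching).contains p.1 = matching.any (fun q => q.1 == p.1) :=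
      PySem.Dict.contains_mk matching p.1
    rw [hc]
    have hd : (pvA_dfs adj mv ((adj.map (·.2)).flatten.length + 1) p.1 PySem.Set.empty).1 =
        pvB_search adj mv ((adj.map (·.2)).flatten.length + 2) [p.1] PySem.Set.empty := by
      apply Bool.eq_iff_iff.mpr
      rw [pvA_dfs_iff adj mv p.1, pvB_search_iff adj mv p.1]
    rw [hd, ih]

-- ===== validity equivalence =====
lemma pvA_valid_iff (adj : List (Int × List Int)) :
    ∀ matching (rm : List Int), pvA_valid adj matching rm = true ↔
      (∀ p ∈ matching, p.2 ∈ pvAdjGet adj p.1) ∧ (matching.map (·.2)).Nodup ∧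
        ∀ p ∈ matching, p.2 ∉ rm := by
  intro matching
  induction matching with
  | nil => intro rm; simp [pvA_valid]
  | cons p rest ih =>
    intro rm
    rw [pvA_valid]
    by_cases hmem : p.2 ∈ pvAdjGet adj p.1
    · rw [if_pos hmem]
      by_cases hrm : p.2 ∈ rm
      · rw [if_pos hrm]
        refine iff_of_false (by simp) ?_
        rintro ⟨-, -, h3⟩
        exact h3 p (List.mem_cons_self ..) hrm
      · rw [if_neg hrm, ih (PySem.Set.add rm p.2)]
        constructor
        · rintro ⟨h1, h2, h3⟩
          refine ⟨?_, ?_, ?_⟩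
          · intro q hq
            rcases List.mem_cons.mp hq with rfl | hq'
            · exact hmem
            · exact h1 q hq'
          · rw [List.map_cons, List.nodup_cons]
            refine ⟨?_, h2⟩
            rw [List.mem_map]
            rintro ⟨q, hq, hq2⟩
            exact (h3 q hq) ((PySem.Set.mem_add _ _ _).mpr (Or.inr hq2))
          · intro q hq
            rcases List.mem_cons.mp hq with rfl | hq'
            · exact hrm
            · intro hc
              exact (h3 q hq') ((PySem.Set.mem_add _ _ _).mpr (Or.inl hc))
        · rintro ⟨h1, h2, h3⟩
          rw [List.map_cons, List.nodup_cons] at h2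
          refine ⟨fun q hq => h1 q (List.mem_cons_of_mem _ hq), h2.2, fun q hq hc => ?_⟩
          rcases (PySem.Set.mem_add _ _ _).mp hc with hc' | hc'
          · exact (h3 q (List.mem_cons_of_mem _ hq)) hc'
          · exact h2.1 (List.mem_map.mpr ⟨q, hq, hc'⟩)
    · rw [if_neg hmem]
      refine iff_of_false (by simp) ?_
      rintro ⟨h1, -, -⟩
      exact hmem (h1 p (List.mem_cons_self ..))

lemma pv_len_ofList_iff (l : List Int) :
    ((PySem.Set.ofList l).length = l.length) ↔ l.Nodup := by
  induction l with
  | nil => simp [PySem.Set.ofList_nil]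
  | cons x xs ih =>
    rw [PySem.Set.ofList_cons, List.length_cons, List.length_cons, List.nodup_cons]
    by_cases hx : x ∈ xs
    · have hlt : ((PySem.Set.ofList xs).discard x).length < (PySem.Set.ofList xs).length := by
        apply List.length_filter_lt_length_iff_exists.mpr
        exact ⟨x, (PySem.Set.mem_ofList _ _).mpr hx, by simp⟩
      have hle := PySem.Set.length_ofList_le xs
      constructor
      · intro h; omega
      · rintro ⟨hnx, -⟩; exact absurd hx hnx
    · have heq : (PySem.Set.ofList xs).discard x = PySem.Set.ofList xs := by
        apply List.filter_eq_self.mpr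
        intro a ha
        simp only [Bool.not_eq_eq_eq_not, Bool.not_true, beq_eq_false_iff_ne, ne_eq]
        rintro rfl
        exact hx ((PySem.Set.mem_ofList _ _).mp ha)
      rw [heq]
      constructor
      · intro h; exact ⟨hx, ih.mp (by omega)⟩
      · rintro ⟨-, hnd⟩; rw [ih.mpr hnd]

lemma pv_valid_eq (adj : List (Int × List Int)) (matching : List (Int × Int)) :
    pvA_valid adj matching PySem.Set.empty =
      (!(matching.any (fun p => decide (p.2 ∉ pvAdjGet adj p.1))) &&
        !(PySem.Set.len (PySem.Set.ofList (matching.map (·.2))) != (matching.map (·.2)).length)) := by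
  apply Bool.eq_iff_iff.mpr
  rw [pvA_valid_iff adj matching PySem.Set.empty]
  simp only [Bool.and_eq_true, Bool.not_eq_eq_eq_not, Bool.not_true, List.any_eq_false,
    bne_eq_false_iff_eq, PySem.Set.len]
  constructor
  · rintro ⟨h1, h2, -⟩
    refine ⟨fun p hp => by simp [h1 p hp], by exact_mod_cast pv_len_ofList_iff (matching.map (·.2)) |>.mpr h2⟩
  · rintro ⟨h1, h2⟩
    refine ⟨fun p hp => by simpa using h1 p hp, ?_, fun p hp => ?_⟩
    · exact pv_len_ofList_iff (matching.map (·.2)) |>.mp (by exact_mod_cast h2)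
    · simp [PySem.Set.empty]

-- ===== VERDICT (by name: the statement is the Claim_ definition above) =====
theorem bipartite_matching_correct_spec : Claim_equal_bipartite_matching_correct := by
  unfold Claim_equal_bipartite_matching_correct Spec_bipartite_matching_correct
  intro adj matching _
  unfold bipartite_matching_correct bipartite_matching_correct_alt
  rw [pv_valid_eq adj matching]
  cases hany : matching.any (fun p => decide (p.2 ∉ pvAdjGet adj p.1)) with
  | true => simp
  | false =>
    cases hneq : (PySem.Set.len (PySem.Set.ofList (matching.map (·.2))) !=
        (matching.map (·.2)).length) with
    | true => simp
    | false => simp [pv_outer_eq adj (pvMatchV matching) matching adj]
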